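-- pv_equiv track=rewrite | github.com/choidaesig/study_programmers | 프로그래머스/unrated/138476. 귤 고르기/귤 고르기.py | solution
-- ===== SOURCE A (Python) =====
-- def solution(k, tangerine):
--     answer = 0
--     dic={}
--     for i in tangerine:
--         if i in dic:
--             dic[i]+=1
--         else:
--             dic[i]=1
--     cnt=[]
--     for j in dic.keys():
--         cnt.append(dic[j])
--     cnt.sort()
--     while k>0:
--         k-=cnt[-1]
--         cnt.pop()
--         answer+=1
--     return answer
-- ===== SOURCE B (Python) =====
-- def solution(k, tangerine):
--     cnt = {}
--     for t in tangerine: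
--         cnt[t] = cnt.get(t, 0) + 1
--     n = len(tangerine)
--     bucket = [0] * (n + 1)
--     for c in cnt.values():
--         bucket[c] += 1
--     answer = 0
--     c = n
--     while k > 0 and c > 0:
--         take = bucket[c]
--         while take > 0 and k > 0:
--             k -= c
--             answer += 1
--             take -= 1
--         c -= 1
--     return answer
-- ===== Notes on version B (the rewrite author's own statement) =====
-- stated objective: alternative
-- what changed: B replaces A's build-list-of-counts + comparison sort + pop-from-end loop by a bucket array indexed by count value, walked from the largest count downward, taking groups until k is covered (no sorting at all).
import Mathlib
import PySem

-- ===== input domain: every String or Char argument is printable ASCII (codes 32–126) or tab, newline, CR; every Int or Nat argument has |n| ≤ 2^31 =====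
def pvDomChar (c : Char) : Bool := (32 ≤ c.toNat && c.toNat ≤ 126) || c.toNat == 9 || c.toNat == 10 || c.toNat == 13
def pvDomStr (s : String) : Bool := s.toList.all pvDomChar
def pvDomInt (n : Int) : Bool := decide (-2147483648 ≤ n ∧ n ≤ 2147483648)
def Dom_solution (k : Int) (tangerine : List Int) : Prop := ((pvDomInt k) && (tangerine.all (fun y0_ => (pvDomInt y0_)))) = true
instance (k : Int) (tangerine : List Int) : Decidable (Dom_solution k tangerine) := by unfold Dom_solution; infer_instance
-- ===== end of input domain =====

-- B replaces A's comparison sort of the counts by a bucket array indexed by count value,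
-- walked from the largest count downward (alternative decomposition, no sort).

-- ===== PORT A =====
-- the 'while k>0: k -= cnt[-1]; cnt.pop(); answer += 1' loop; cnt[-1] on an empty cnt is an
-- IndexError in Python (excluded by Pre_solution); the port returns the accumulator there.
def aLoop (k answer : Int) (cnt : List Int) : Int :=
  if k > 0 then
    match h : cnt.getLast? with
    | none => answer
    | some c => aLoop (k - c) (answer + 1) cnt.dropLast
  else answer
termination_by cnt.length
decreasing_by
  cases cnt with
  | nil => simp at h
  | cons x xs => simp [List.length_dropLast]

def solution (k : Int) (tangerine : List Int) : Int :=
  let dic := tangerine.foldl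
    (fun d i => if d.contains i then d.modify i 0 (· + 1) else d.insert i 1) PySem.Dict.empty
  let cnt := dic.keys.foldl (fun acc j => acc ++ [dic.getD j 0]) []
  let cnt := PySem.List.sorted cnt (fun x => x) false
  aLoop k 0 cnt

-- ===== PORT B =====
-- the inner 'while take > 0 and k > 0' loop; returns the updated (k, answer)
def bInner (c k answer take : Int) : Int × Int :=
  if take > 0 ∧ k > 0 then bInner c (k - c) (answer + 1) (take - 1) else (k, answer)
termination_by take.toNat
decreasing_by omega

-- the outer 'while k > 0 and c > 0' loop, c counted down structurally
def bOuter (bucket : List Int) (k answer : Int) : Nat → Int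
  | 0 => answer
  | c + 1 =>
    if k > 0 then
      let p := bInner ((c : Int) + 1) k answer (PySem.List.pyGetD bucket ((c : Int) + 1) 0)
      bOuter bucket p.1 p.2 c
    else answer

def solution_alt (k : Int) (tangerine : List Int) : Int :=
  let cnt := tangerine.foldl (fun d t => d.insert t (d.getD t 0 + 1)) PySem.Dict.empty
  let n := tangerine.length
  let bucket := cnt.values.foldl
    (fun b c => PySem.List.pySetD b c (PySem.List.pyGetD b c 0 + 1)) (List.replicate (n + 1) 0)
  bOuter bucket k 0 n

-- ===== PRECONDITION & SPEC =====
-- Pre_ excludes exactly the inputs where A raises IndexError: k larger than the number of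
-- fruits, so the count list is exhausted while k is still positive.
def Pre_solution (k : Int) (tangerine : List Int) : Prop := k ≤ (tangerine.length : Int)
instance (k : Int) (tangerine : List Int) : Decidable (Pre_solution k tangerine) := by unfold Pre_solution; infer_instance
def pvWitness_solution : Int × List Int := (2, [1, 1, 2])

def Spec_solution (k : Int) (tangerine : List Int) (out : Int) : Prop := out = solution_alt k tangerine
instance (k : Int) (tangerine : List Int) (out : Int) : Decidable (Spec_solution k tangerine out) := by unfold Spec_solution; infer_instance

-- ===== CLAIM (what is proved, stated in full; the proofs are below) =====
def Claim_equal_solution : Prop := ∀ (k : Int) (tangerine : List Int), Dom_solution k tangerine → Pre_solution k tangerine → Spec_solution k tangerine (solution k tangerine)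

-- ===== LEMMAS AND PROOFS =====

-- canonical greedy loop over a descending list of counts
def loopD (k a : Int) : List Int → Int
  | [] => a
  | c :: rest => if k > 0 then loopD (k - c) (a + 1) rest else a

theorem loopD_nonpos (k a : Int) (l : List Int) (h : ¬ k > 0) : loopD k a l = a := by
  cases l <;> simp [loopD, h]

theorem aLoop_eq_loopD (l : List Int) : ∀ k a : Int, aLoop k a l.reverse = loopD k a l := by
  induction l with
  | nil => intro k a; rw [aLoop]; simp [loopD]
  | cons c t ih =>
    intro k a
    rw [aLoop]
    by_cases hk : k > 0
    · simp only [hk, if_pos]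
      split
      · next h => simp at h
      · next c' h =>
        have hg : (c :: t).reverse.getLast? = some c := by simp
        rw [hg] at h
        cases h
        have hd : (c :: t).reverse.dropLast = t.reverse := by simp
        rw [hd, ih, loopD]
        simp [hk]
    · simp [hk, loopD]

-- the bucket walk produces the counts in descending order: bucket[c] copies of c, then c-1 …
def descList (bucket : List Int) : Nat → List Int
  | 0 => []
  | c + 1 => List.replicate (PySem.List.pyGetD bucket ((c : Int) + 1) 0).toNat ((c : Int) + 1)
      ++ descList bucket c

theorem bInner_eq_loopD (c : Int) : ∀ (n : Nat) (t k a : Int) (rest : List Int), t.toNat = n →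
    loopD k a (List.replicate n c ++ rest)
      = loopD (bInner c k a t).1 (bInner c k a t).2 rest := by
  intro n
  induction n with
  | zero =>
    intro t k a rest ht
    rw [bInner]
    have : ¬ (t > 0 ∧ k > 0) := by omega
    simp [this]
  | succ m ih =>
    intro t k a rest ht
    rw [bInner]
    by_cases hk : k > 0
    · have hcond : t > 0 ∧ k > 0 := ⟨by omega, hk⟩
      simp only [hcond]
      rw [List.replicate_succ, List.cons_append, loopD, if_pos hk]
      exact ih (t - 1) (k - c) (a + 1) rest (by omega)
    · have hcond : ¬ (t > 0 ∧ k > 0) := by tauto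
      simp only [hcond, if_neg, not_false_iff]
      rw [List.replicate_succ, List.cons_append, loopD, if_neg hk, loopD_nonpos _ _ _ hk]

theorem bOuter_eq_loopD (bucket : List Int) : ∀ (c : Nat) (k a : Int),
    bOuter bucket k a c = loopD k a (descList bucket c) := by
  intro c
  induction c with
  | zero => intro k a; simp [bOuter, descList, loopD]
  | succ m ih =>
    intro k a
    by_cases hk : k > 0
    · rw [bOuter, if_pos hk, descList, bInner_eq_loopD _ _ _ _ _ _ rfl, ih]
    · rw [bOuter, if_neg hk, descList, loopD_nonpos _ _ _ hk]

-- the distinct sizes with their multiplicities: the list of counts both programs work from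
def valsOf (t : List Int) : List Int := (PySem.Set.ofList t).map fun v => (t.count v : Int)

def bucketOf (t : List Int) : List Int :=
  (valsOf t).foldl (fun b c => PySem.List.pySetD b c (PySem.List.pyGetD b c 0 + 1))
    (List.replicate (t.length + 1) 0)

theorem vals_bounds (t : List Int) : ∀ v ∈ valsOf t, 1 ≤ v ∧ v ≤ (t.length : Int) := by
  intro v hv
  rcases List.mem_map.mp hv with ⟨x, hx, rfl⟩
  have hxt : x ∈ t := (PySem.Set.mem_ofList t x).mp hx
  have h1 := List.count_pos_iff.mpr hxt
  have h2 := List.count_le_length (l := t) (a := x)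
  omega

theorem bucket_getD (l : List Int) : ∀ (b : List Int), (∀ v ∈ l, 0 ≤ v ∧ v < (b.length : Int)) →
    ∀ i : Int, 0 ≤ i → i < (b.length : Int) →
    PySem.List.pyGetD (l.foldl (fun b c => PySem.List.pySetD b c (PySem.List.pyGetD b c 0 + 1)) b) i 0
      = PySem.List.pyGetD b i 0 + (l.count i : Int) := by
  induction l with
  | nil => intro b _ i _ _; simp
  | cons v l' ih =>
    intro b hb i hi0 hilen
    have hv := hb v (by simp)
    have hlen : (PySem.List.pySetD b v (PySem.List.pyGetD b v 0 + 1)).length = b.length := by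
      simp [PySem.List.length_pySetD]
    rw [List.foldl_cons, ih _ (by rw [hlen]; intro w hw; exact hb w (by simp [hw])) i hi0 (by rw [hlen]; exact hilen)]
    rw [PySem.List.pySetD_of_nonneg _ _ hv.1, PySem.List.pyGetD_of_nonneg _ _ hi0,
        PySem.List.pyGetD_of_nonneg _ _ hi0, List.getD_eq_getElem?_getD, List.getD_eq_getElem?_getD,
        List.getElem?_set]
    by_cases he : v.toNat = i.toNat
    · have hvi : v = i := by omega
      simp [hvi, show i.toNat < b.length by omega,
        List.getD_eq_getElem?_getD, PySem.List.pyGetD_of_nonneg _ _ hi0]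
      omega
    · simp [he, show ¬ (v = i) by omega]

theorem bucketOf_getD (t : List Int) (i : Int) (h0 : 0 ≤ i) (h1 : i ≤ (t.length : Int)) :
    PySem.List.pyGetD (bucketOf t) i 0 = ((valsOf t).count i : Int) := by
  have hb : ∀ v ∈ valsOf t, 0 ≤ v ∧ v < ((List.replicate (t.length + 1) (0:Int)).length : Int) := by
    intro v hv
    have := vals_bounds t v hv
    simp [List.length_replicate]
    omega
  rw [bucketOf, bucket_getD _ _ hb i h0 (by simp; omega),
    PySem.List.pyGetD_of_nonneg _ _ h0]
  simp [List.getD_eq_getElem?_getD]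

theorem descList_count (bucket : List Int) : ∀ (c : Nat) (x : Int),
    (descList bucket c).count x
      = if 1 ≤ x ∧ x ≤ (c : Int) then (PySem.List.pyGetD bucket x 0).toNat else 0 := by
  intro c
  induction c with
  | zero => intro x; simp [descList]; omega
  | succ m ih =>
    intro x
    rw [descList, List.count_append, ih x, List.count_replicate]
    by_cases he : x = (m : Int) + 1
    · subst he
      have h4 : ¬ (1 ≤ ((m : Int) + 1) ∧ ((m : Int) + 1) ≤ (m : Int)) := by omega
      have h3 : 1 ≤ ((m : Int) + 1) ∧ ((m : Int) + 1) ≤ (m : Int) + 1 := by omega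
      simp [h3]
    · have h1 : ¬ (((m : Int) + 1) = x) := fun h => he h.symm
      by_cases h2 : 1 ≤ x ∧ x ≤ (m : Int)
      · have h3 : (1 ≤ x ∧ x ≤ (m : Int) + 1) := by omega
        simp [h1, h2, h3]
      · have h3 : ¬ (1 ≤ x ∧ x ≤ (m : Int) + 1) := by omega
        simp [h1, h2, h3]

theorem descList_le (bucket : List Int) : ∀ (c : Nat), ∀ x ∈ descList bucket c, x ≤ (c : Int) := by
  intro c
  induction c with
  | zero => simp [descList]
  | succ m ih =>
    intro x hx
    rw [descList, List.mem_append] at hx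
    rcases hx with h | h
    · have := List.eq_of_mem_replicate h; omega
    · have := ih x h; omega

theorem descList_pairwise (bucket : List Int) : ∀ (c : Nat),
    (descList bucket c).Pairwise (fun a b => b ≤ a) := by
  intro c
  induction c with
  | zero => simp [descList]
  | succ m ih =>
    rw [descList, List.pairwise_append]
    refine ⟨List.pairwise_replicate.mpr (by simp), ih, ?_⟩
    intro a ha b hb
    have h1 := List.eq_of_mem_replicate ha
    have h2 := descList_le bucket m b hb
    omega

theorem main_list_eq (t : List Int) :
    (PySem.List.sorted (valsOf t) (fun x => x) false).reverse = descList (bucketOf t) t.length := by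
  have hperm : (PySem.List.sorted (valsOf t) (fun x => x) false).reverse.Perm (descList (bucketOf t) t.length) := by
    rw [List.perm_iff_count]
    intro x
    rw [List.count_reverse, (PySem.List.sorted_perm (valsOf t) (fun x => x) false).count_eq,
      descList_count]
    by_cases hx : 1 ≤ x ∧ x ≤ (t.length : Int)
    · rw [if_pos hx, bucketOf_getD t x (by omega) (by omega)]
      omega
    · rw [if_neg hx]
      by_contra hne
      have hmem : x ∈ valsOf t := List.count_pos_iff.mp (by omega)
      have := vals_bounds t x hmem
      omega
  refine PySem.List.eq_of_perm_of_pairwise_le_of_injective (fun x : Int => -x) (fun a b h => by simpa using h) hperm ?_ ?_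
  · have := PySem.List.sorted_pairwise (valsOf t) (fun x => x)
    exact (List.pairwise_reverse.mpr (this.imp (by intro a b h; dsimp only; omega)))
  · exact (descList_pairwise (bucketOf t) t.length).imp (by intro a b h; dsimp only; omega)

theorem solutionA_eq (k : Int) (t : List Int) :
    solution k t = aLoop k 0 (PySem.List.sorted (valsOf t) (fun x => x) false) := by
  rw [solution]
  have hdic : t.foldl (fun d i => if d.contains i then d.modify i 0 (· + 1) else d.insert i 1)
      PySem.Dict.empty = PySem.Dict.counter t := by
    rw [PySem.Dict.counter_eq_foldl]
    apply PySem.List.foldl_congr_mem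
    intro acc x _
    by_cases hc : acc.contains x
    · simp [hc, PySem.Dict.modify]
    · have h0 : acc.getD x 0 = 0 := PySem.Dict.getD_of_not_contains acc 0 (by simpa using hc)
      simp [hc, PySem.Dict.modify, h0]
  rw [hdic, PySem.List.foldl_append_singleton_eq_map]
  simp [PySem.Dict.keys_counter, PySem.Dict.getD_counter, valsOf]

theorem solutionB_eq (k : Int) (t : List Int) :
    solution_alt k t = bOuter (bucketOf t) k 0 t.length := by
  rw [solution_alt, PySem.Dict.foldl_insert_getD_add_one_eq_counter]
  have hvals : (PySem.Dict.counter t).values = valsOf t := by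
    simp [PySem.Dict.values, PySem.Dict.items_counter, List.map_map, valsOf]
  rw [hvals, bucketOf]

-- ===== VERDICT (by name: the statement is the Claim_ definition above) =====
theorem solution_spec : Claim_equal_solution := by
  intro k t _ _
  unfold Spec_solution
  rw [solutionA_eq]
  conv_lhs => rw [← List.reverse_reverse (PySem.List.sorted (valsOf t) (fun x => x) false)]
  rw [aLoop_eq_loopD, main_list_eq, ← bOuter_eq_loopD, ← solutionB_eq]
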